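-- pv_equiv track=rewrite | github.com/bh34e5/aoc_2024 | day_12/work.py | hori_diffs
-- ===== SOURCE A (Python) =====
-- from typing import Dict, List, Optional, Tuple, Union
--
-- def hori_diffs(chars: List[List[int]]) -> Dict[Union[int, None], int]:
--     res: Dict[Union[int, None], int] = {}
--     for row in chars:
--         for c_one, c_two in zip([None, *row], [*row, None]):
--             if c_one != c_two:
--                 res[c_one] = res.get(c_one, 0) + 1
--                 res[c_two] = res.get(c_two, 0) + 1
--     return res
-- ===== SOURCE B (Python) =====
-- from itertools import groupby
-- from typing import Dict, List, Union
--
--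
-- def hori_diffs(chars: List[List[int]]) -> Dict[Union[int, None], int]:
--     res: Dict[Union[int, None], int] = {}
--     for row in chars:
--         if row:
--             res[None] = res.get(None, 0) + 2
--             for v, _ in groupby(row):
--                 res[v] = res.get(v, 0) + 2
--     return res
-- ===== Notes on version B (the rewrite author's own statement) =====
-- stated objective: alternative
-- what changed: Replaces A's sentinel-padded adjacent-pair zip scan (two conditional +1 bumps per boundary) with run-length grouping: each non-empty row adds 2 to the None key once, and each maximal run of equal values adds 2 to its value via itertools.groupby.
import Mathlib
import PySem

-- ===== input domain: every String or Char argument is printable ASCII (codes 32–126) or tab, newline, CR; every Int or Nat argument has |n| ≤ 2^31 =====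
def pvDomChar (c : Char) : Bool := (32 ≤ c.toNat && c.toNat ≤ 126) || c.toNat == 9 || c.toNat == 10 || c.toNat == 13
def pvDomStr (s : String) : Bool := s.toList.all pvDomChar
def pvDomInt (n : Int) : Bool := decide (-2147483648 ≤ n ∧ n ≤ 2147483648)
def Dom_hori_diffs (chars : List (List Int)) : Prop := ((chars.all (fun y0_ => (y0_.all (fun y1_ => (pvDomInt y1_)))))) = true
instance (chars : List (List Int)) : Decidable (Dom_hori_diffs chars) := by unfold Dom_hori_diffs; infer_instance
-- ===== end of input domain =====

-- B replaces A's sentinel-padded adjacent-pair scan with run grouping (+2 per maximal run value, +2 to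
-- the None key per non-empty row); proved to return the same assoc list, including insertion order.

-- ===== PORT A =====
-- res[k] = res.get(k, 0) + 1
def pvBump (d : PySem.Dict (Option Int) Int) (k : Option Int) : PySem.Dict (Option Int) Int :=
  d.insert k (d.getD k 0 + 1)

-- body of A's inner loop: one zipped pair (c_one, c_two)
def pvStepA (res : PySem.Dict (Option Int) Int) (p : Option Int × Option Int) :
    PySem.Dict (Option Int) Int :=
  if p.1 ≠ p.2 then pvBump (pvBump res p.1) p.2 else res

-- body of A's outer loop: one row, scanned as zip([None, *row], [*row, None])
def pvInnerA (res : PySem.Dict (Option Int) Int) (row : List Int) : PySem.Dict (Option Int) Int :=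
  (List.zip ((none : Option Int) :: row.map some) (row.map some ++ [none])).foldl pvStepA res

def hori_diffs (chars : List (List Int)) : List (Option Int × Int) :=
  (chars.foldl pvInnerA PySem.Dict.empty).items

-- ===== PORT B =====
-- res[k] = res.get(k, 0) + 2
def pvBump2 (d : PySem.Dict (Option Int) Int) (k : Option Int) : PySem.Dict (Option Int) Int :=
  d.insert k (d.getD k 0 + 2)

-- the keys of itertools.groupby(row): one representative per maximal run of equal adjacent values
def pvRunKeys : List Int → List Int
  | [] => []
  | [a] => [a]
  | a :: b :: t => if a = b then pvRunKeys (b :: t) else a :: pvRunKeys (b :: t)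

-- body of B's loop: skip empty rows, else +2 to None, then +2 per run key
def pvInnerB (res : PySem.Dict (Option Int) Int) (row : List Int) : PySem.Dict (Option Int) Int :=
  if row.isEmpty then res
  else (pvRunKeys row).foldl (fun r v => pvBump2 r (some v)) (pvBump2 res (none : Option Int))

def hori_diffs_alt (chars : List (List Int)) : List (Option Int × Int) :=
  (chars.foldl pvInnerB PySem.Dict.empty).items

-- ===== PRECONDITION & SPEC =====
def Spec_hori_diffs (chars : List (List Int)) (out : List (Option Int × Int)) : Prop := out = hori_diffs_alt chars
instance (chars : List (List Int)) (out : List (Option Int × Int)) : Decidable (Spec_hori_diffs chars out) := by unfold Spec_hori_diffs; infer_instance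

-- ===== CLAIM (what is proved, stated in full; the proofs are below) =====
def Claim_equal_hori_diffs : Prop := ∀ (chars : List (List Int)), Dom_hori_diffs chars → Spec_hori_diffs chars (hori_diffs chars)

-- ===== LEMMAS AND PROOFS =====

-- run keys of the remainder of a row, given the value of the current run
def pvRunKeysAfter (prev : Int) : List Int → List Int
  | [] => []
  | b :: t => if prev = b then pvRunKeysAfter b t else b :: pvRunKeysAfter b t

theorem pvRunKeys_cons (a : Int) (rest : List Int) :
    pvRunKeys (a :: rest) = a :: pvRunKeysAfter a rest := by
  induction rest generalizing a with
  | nil => simp [pvRunKeys, pvRunKeysAfter]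
  | cons b t ih =>
    by_cases h : a = b <;> simp [pvRunKeys, pvRunKeysAfter, h, ih b]

theorem pvBump_pvBump (d : PySem.Dict (Option Int) Int) (k : Option Int) :
    pvBump (pvBump d k) k = pvBump2 d k := by
  simp [pvBump, pvBump2, PySem.Dict.insert_insert_self, PySem.Dict.getD_insert_self]
  ring_nf

theorem pvInsert_comm (d : PySem.Dict (Option Int) Int) (k k' : Option Int) (v w : Int)
    (hne : k ≠ k') (hk : d.contains k = true) :
    (d.insert k' w).insert k v = (d.insert k v).insert k' w := by
  have hk2 : (d.insert k' w).contains k = true := by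
    rw [PySem.Dict.contains_insert]; simp [hk]
  apply PySem.Dict.ext
  cases hc' : d.contains k' with
  | true =>
    have hc'2 : (d.insert k v).contains k' = true := by
      rw [PySem.Dict.contains_insert]; simp [hc']
    rw [PySem.Dict.items_insert_of_contains _ _ hk2,
        PySem.Dict.items_insert_of_contains _ _ hc',
        PySem.Dict.items_insert_of_contains _ _ hc'2,
        PySem.Dict.items_insert_of_contains _ _ hk]
    simp only [List.map_map]
    apply List.map_congr_left
    intro p _
    simp only [Function.comp_apply]
    by_cases h1 : p.1 = k' <;> by_cases h2 : p.1 = k <;>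
      simp [h1, h2, hne, Ne.symm hne]
  | false =>
    have hc'2 : (d.insert k v).contains k' = false := by
      rw [PySem.Dict.contains_insert]
      simp [hc', Ne.symm hne]
    rw [PySem.Dict.items_insert_of_contains _ _ hk2,
        PySem.Dict.items_insert_of_not_contains _ _ hc',
        PySem.Dict.items_insert_of_not_contains _ _ hc'2,
        PySem.Dict.items_insert_of_contains _ _ hk]
    simp [Ne.symm hne]

-- bumping None commutes with a +2 bump at a (some _) key, once None is already present
theorem pvBump_pvBump2_comm (d : PySem.Dict (Option Int) Int) (v : Int)
    (h : d.contains (none : Option Int) = true) :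
    pvBump (pvBump2 d (some v)) none = pvBump2 (pvBump d none) (some v) := by
  have hg : (d.insert (some v) (d.getD (some v) 0 + 2)).getD (none : Option Int) 0 = d.getD none 0 :=
    PySem.Dict.getD_insert_of_ne _ _ _ (by simp)
  have hg' : (d.insert (none : Option Int) (d.getD none 0 + 1)).getD (some v) 0 = d.getD (some v) 0 :=
    PySem.Dict.getD_insert_of_ne _ _ _ (by simp)
  simp only [pvBump, pvBump2, hg, hg']
  exact pvInsert_comm _ _ _ _ _ (by simp) h

theorem pvContains_none_pvBump2 (d : PySem.Dict (Option Int) Int) (v : Int)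
    (h : d.contains (none : Option Int) = true) :
    (pvBump2 d (some v)).contains (none : Option Int) = true := by
  rw [pvBump2, PySem.Dict.contains_insert]; simp [h]

-- a trailing bump of None moves to the front of a fold over (some _) keys
theorem pvBump_none_foldl (ks : List Int) (d : PySem.Dict (Option Int) Int)
    (h : d.contains (none : Option Int) = true) :
    pvBump (ks.foldl (fun r v => pvBump2 r (some v)) d) none
      = ks.foldl (fun r v => pvBump2 r (some v)) (pvBump d none) := by
  induction ks generalizing d with
  | nil => simp
  | cons a t ih =>
    simp only [List.foldl_cons]
    rw [ih _ (pvContains_none_pvBump2 d a h), pvBump_pvBump2_comm d a h]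

-- A's fold over the remaining zipped pairs, in terms of the run keys of the remainder
theorem pvTail_fold (rest : List Int) (prev : Int) (d : PySem.Dict (Option Int) Int) :
    (List.zip ((prev :: rest).map some) (rest.map some ++ [(none : Option Int)])).foldl pvStepA d
      = pvBump ((pvRunKeysAfter prev rest).foldl (fun r v => pvBump2 r (some v))
          (pvBump d (some prev))) none := by
  induction rest generalizing prev d with
  | nil => simp [pvStepA, pvRunKeysAfter]
  | cons b t ih =>
    rw [show ((prev :: b :: t).map some).zip ((b :: t).map some ++ [(none : Option Int)])
          = ((some prev : Option Int), (some b : Option Int))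
              :: ((b :: t).map some).zip (t.map some ++ [none]) from rfl,
        List.foldl_cons]
    by_cases h : prev = b
    · subst h
      rw [show pvStepA d (some prev, some prev) = d from by simp [pvStepA]]
      rw [ih prev d]
      simp [pvRunKeysAfter]
    · rw [show pvStepA d (some prev, some b) = pvBump (pvBump d (some prev)) (some b) from by
        simp [pvStepA, h]]
      rw [ih b]
      simp [pvRunKeysAfter, h, pvBump_pvBump]

theorem pvInner_eq (d : PySem.Dict (Option Int) Int) (row : List Int) :
    pvInnerA d row = pvInnerB d row := by
  cases row with
  | nil => simp [pvInnerA, pvInnerB, pvStepA]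
  | cons a rest =>
    have hc0 : (pvBump d (none : Option Int)).contains (none : Option Int) = true :=
      PySem.Dict.contains_insert_self _ _ _
    have hc : (pvBump2 (pvBump d none) (some a)).contains (none : Option Int) = true :=
      pvContains_none_pvBump2 _ _ hc0
    have step1 :
        pvInnerA d (a :: rest)
          = pvBump ((pvRunKeysAfter a rest).foldl (fun r v => pvBump2 r (some v))
              (pvBump (pvBump (pvBump d none) (some a)) (some a))) none := by
      show (List.zip ((a :: rest).map some) (rest.map some ++ [(none : Option Int)])).foldl
             pvStepA (pvStepA d ((none : Option Int), some a)) = _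
      rw [show pvStepA d ((none : Option Int), some a) = pvBump (pvBump d none) (some a) from by
        simp [pvStepA]]
      exact pvTail_fold rest a (pvBump (pvBump d none) (some a))
    rw [step1, pvBump_pvBump, pvBump_none_foldl _ _ hc, pvBump_pvBump2_comm _ _ hc0, pvBump_pvBump]
    simp [pvInnerB, pvRunKeys_cons, List.foldl_cons]

theorem pvFolds_eq (chars : List (List Int)) (d : PySem.Dict (Option Int) Int) :
    chars.foldl pvInnerA d = chars.foldl pvInnerB d := by
  induction chars generalizing d with
  | nil => rfl
  | cons row t ih => rw [List.foldl_cons, List.foldl_cons, pvInner_eq]; exact ih _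

-- ===== VERDICT (by name: the statement is the Claim_ definition above) =====
theorem hori_diffs_spec : Claim_equal_hori_diffs := by
  intro chars _
  show hori_diffs chars = hori_diffs_alt chars
  unfold hori_diffs hori_diffs_alt
  rw [pvFolds_eq]
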